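-- pv_equiv track=rewrite | github.com/daniel-reich/ubiquitous-fiesta | xFme9FBuvHLveh5nE_17.py | is_zygodrome
-- ===== SOURCE A (Python) =====
-- def is_zygodrome(num):
--   num = str(num)
--   list_num_place = 0
--   list_num = [[num[list_num_place]]]
--   actual_value = num[0]
--   score = 0
--
--   for s in range(1, len(num)):
--     if num[s] == actual_value:
--       list_num[list_num_place].append(num[s])
--       actual_value = num[s]
--     else:
--       list_num_place += 1
--       list_num.append([])
--       list_num[list_num_place].append(num[s])
--       actual_value = num[s]
--
--   score = sum([1 for nl in list_num if len(nl) > 1])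
--
--   return score == len(list_num)
-- ===== SOURCE B (Python) =====
-- def is_zygodrome(num):
--   s = str(num)
--   return _runs_ok(list(s))
--
-- def _runs_ok(s):
--   # consume one maximal run of the leading character; it must have length >= 2
--   if not s:
--     return True
--   rest = s[1:]
--   k = 0
--   while k < len(rest) and rest[k] == s[0]:
--     k += 1
--   return k >= 1 and _runs_ok(rest[k:])
-- ===== Notes on version B (the rewrite author's own statement) =====
-- stated objective: simpler
-- what changed: A builds a list of digit-run groups via an indexed loop and then counts the groups of length > 1, comparing the count to the number of groups; B never materialises groups: it recursively consumes one maximal run at a time with a while-loop counter and short-circuits as soon as a run of length 1 is found.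
import Mathlib
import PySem

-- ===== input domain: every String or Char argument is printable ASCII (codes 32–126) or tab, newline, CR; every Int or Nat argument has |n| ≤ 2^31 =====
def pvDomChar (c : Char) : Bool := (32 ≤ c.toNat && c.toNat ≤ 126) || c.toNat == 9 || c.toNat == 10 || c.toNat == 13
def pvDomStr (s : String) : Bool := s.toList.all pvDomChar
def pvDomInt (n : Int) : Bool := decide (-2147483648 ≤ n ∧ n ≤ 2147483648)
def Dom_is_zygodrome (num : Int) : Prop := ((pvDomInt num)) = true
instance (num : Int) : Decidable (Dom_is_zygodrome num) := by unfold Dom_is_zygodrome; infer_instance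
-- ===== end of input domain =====

-- B replaces A's group-list construction + count by a run-consuming recursion with
-- short-circuit (objective: simpler; same O(n) cost).

-- ===== PORT A =====
-- one iteration of A's for-loop; state = (list_num, list_num_place, actual_value)
def stepA (st : List (List Char) × Nat × Char) (ch : Char) : List (List Char) × Nat × Char :=
  let (list_num, place, actual) := st
  if ch = actual then
    (list_num.modify place (fun g => g ++ [ch]), place, ch)
  else
    ((list_num ++ [[]]).modify (place + 1) (fun g => g ++ [ch]), place + 1, ch)

def is_zygodrome (num : Int) : Bool :=
  -- num = str(num); the for-loop over range(1, len(num)) reads num[s], i.e. traverses the tail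
  match PySem.Int.toChars num with
  | [] => true  -- unreachable: str of an int is never empty (Python A would raise IndexError at num[0])
  | c :: rest =>
    let st := rest.foldl stepA ([[c]], 0, c)
    let list_num := st.1
    let score := ((list_num.filter (fun nl => decide (1 < nl.length))).map (fun _ => (1 : Int))).sum
    decide (score = PySem.List.len list_num)

-- ===== PORT B =====
-- k = length of the leading run of c inside t (Source B's while loop)
def countLead (c : Char) : List Char → Nat
  | [] => 0
  | d :: t => if d = c then countLead c t + 1 else 0

-- Source B's _runs_ok: consume one maximal run, require length ≥ 2, recurse.
-- fuel only makes the recursion structural (kernel-transparent); it never runs out, since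
-- it starts at the list's length and each call drops at least one element.
def runsOk : Nat → List Char → Bool
  | _, [] => true
  | 0, _ :: _ => true
  | fuel + 1, c :: t => decide (1 ≤ countLead c t) && runsOk fuel (t.drop (countLead c t))

def is_zygodrome_alt (num : Int) : Bool :=
  runsOk (PySem.Int.toChars num).length (PySem.Int.toChars num)

-- ===== PRECONDITION & SPEC =====
def Spec_is_zygodrome (num : Int) (out : Bool) : Prop := out = is_zygodrome_alt num
instance (num : Int) (out : Bool) : Decidable (Spec_is_zygodrome num out) := by unfold Spec_is_zygodrome; infer_instance

-- ===== CLAIM (what is proved, stated in full; the proofs are below) =====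
def Claim_equal_is_zygodrome : Prop := ∀ (num : Int), Dom_is_zygodrome num → Spec_is_zygodrome num (is_zygodrome num)

-- ===== LEMMAS AND PROOFS =====

-- the common skeleton: ok = "the current run already has length ≥ 2"
def fAux : Bool → Char → List Char → Bool
  | ok, _, [] => ok
  | ok, c, d :: t => if d = c then fAux true c t else ok && fAux false d t

theorem modify_append_last (L : List (List Char)) (x : List Char) (f : List Char → List Char) :
    (L ++ [x]).modify L.length f = L ++ [f x] := by
  induction L with
  | nil => simp
  | cons a t ih => simp [ih]

theorem loopA (t : List Char) (G : List (List Char)) (g : List Char) (c : Char) (hg : g ≠ []) :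
    (t.foldl stepA (G ++ [g], G.length, c)).1.all (fun nl => decide (1 < nl.length))
      = (G.all (fun nl => decide (1 < nl.length)) && fAux (decide (1 < g.length)) c t) := by
  induction t generalizing G g c with
  | nil => simp [fAux]
  | cons d t ih =>
    by_cases h : d = c
    · subst h
      have h1 : stepA (G ++ [g], G.length, d) d = (G ++ [g ++ [d]], G.length, d) := by
        simp [stepA, modify_append_last]
      have hbig : decide (1 < (g ++ [d]).length) = true := by
        have := List.length_pos_iff.mpr hg; simp; omega
      rw [List.foldl_cons, h1, ih G (g ++ [d]) d (by simp), hbig]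
      simp [fAux]
    · have h1 : stepA (G ++ [g], G.length, c) d = ((G ++ [g]) ++ [[d]], (G ++ [g]).length, d) := by
        simp only [stepA, if_neg h]
        rw [show G.length + 1 = (G ++ [g]).length by simp, modify_append_last]
        simp
      rw [List.foldl_cons, h1, ih (G ++ [g]) [d] d (by simp)]
      simp [fAux, h, Bool.and_assoc]

theorem runsOk_fuel_irrel (f1 : Nat) : ∀ (f2 : Nat) (t : List Char), t.length ≤ f1 →
    t.length ≤ f2 → runsOk f1 t = runsOk f2 t := by
  induction f1 with
  | zero =>
    intro f2 t h1 _
    cases t with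
    | nil => cases f2 <;> simp [runsOk]
    | cons c t => simp at h1
  | succ f1 ih =>
    intro f2 t h1 h2
    cases t with
    | nil => cases f2 <;> simp [runsOk]
    | cons c t =>
      cases f2 with
      | zero => simp at h2
      | succ f2 =>
        simp only [List.length_cons] at h1 h2
        simp only [runsOk]
        rw [ih f2 (t.drop (countLead c t)) (by simp only [List.length_drop]; omega)
          (by simp only [List.length_drop]; omega)]

theorem fAux_runsOk (t : List Char) : ∀ (c : Char) (fuel : Nat), t.length ≤ fuel →
    (fAux false c t = runsOk (fuel + 1) (c :: t)
      ∧ fAux true c t = runsOk fuel (t.drop (countLead c t))) := by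
  induction t with
  | nil => intro c fuel _; cases fuel <;> simp [fAux, runsOk, countLead]
  | cons d t ih =>
    intro c fuel hf
    cases fuel with
    | zero => simp at hf
    | succ fuel =>
      have hlen : t.length ≤ fuel := by simp at hf; omega
      by_cases h : d = c
      · subst h
        have hdrop : (t.drop (countLead d t)).length ≤ fuel := by
          simp only [List.length_drop]; omega
        refine ⟨?_, ?_⟩
        · simp only [runsOk, countLead, fAux]
          rw [(ih d fuel hlen).2,
            runsOk_fuel_irrel fuel (fuel + 1) _ hdrop (Nat.le_succ_of_le hdrop)]
          simp
        · have hc : countLead d (d :: t) = countLead d t + 1 := by simp [countLead]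
          have hfx : fAux true d (d :: t) = fAux true d t := by simp [fAux]
          rw [hfx, hc, List.drop_succ_cons, (ih d fuel hlen).2,
            runsOk_fuel_irrel fuel (fuel + 1) _ hdrop (Nat.le_succ_of_le hdrop)]
      · refine ⟨?_, ?_⟩
        · simp [runsOk, countLead, h, fAux]
        · simp only [countLead, List.drop_zero, fAux, if_neg h]
          simp [(ih d fuel hlen).1]

-- A's score test is "every group has length > 1"
theorem score_eq_all (L : List (List Char)) :
    decide ((((L.filter (fun nl => decide (1 < nl.length))).map (fun _ => (1 : Int))).sum
        = PySem.List.len L))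
      = L.all (fun nl => decide (1 < nl.length)) := by
  have hsum : ((L.filter (fun nl => decide (1 < nl.length))).map (fun _ => (1 : Int))).sum
      = ((L.filter (fun nl => decide (1 < nl.length))).length : Int) := by
    rw [List.map_const', List.sum_replicate]
    simp
  rw [hsum, PySem.List.len_eq, ← List.countP_eq_length_filter]
  by_cases hall : L.all (fun nl => decide (1 < nl.length)) = true
  · have h1 : L.countP (fun nl => decide (1 < nl.length)) = L.length :=
      List.countP_eq_length.mpr (by simpa [List.all_eq_true] using hall)
    simp [hall, h1]
  · have h1 : L.countP (fun nl => decide (1 < nl.length)) ≠ L.length := by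
      intro hc
      exact hall (List.all_eq_true.mpr (List.countP_eq_length.mp hc))
    have h2 : ¬ ((L.countP (fun nl => decide (1 < nl.length)) : Int) = (L.length : Int)) := by
      exact_mod_cast h1
    rw [decide_eq_false h2]
    exact (Bool.eq_false_iff.mpr hall).symm

-- ===== VERDICT (by name: the statement is the Claim_ definition above) =====
theorem is_zygodrome_spec : Claim_equal_is_zygodrome := by
  intro num _
  unfold Spec_is_zygodrome is_zygodrome is_zygodrome_alt
  cases h : PySem.Int.toChars num with
  | nil => simp [runsOk]
  | cons c rest =>
    simp only
    rw [score_eq_all]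
    have h2 := loopA rest [] [c] c (by simp)
    simp only [List.nil_append, List.length_nil, List.all_nil, Bool.true_and,
      List.length_cons] at h2
    rw [h2]
    simpa using (fAux_runsOk rest c rest.length le_rfl).1
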